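-- pv_equiv track=rewrite | github.com/cristinaimprota/Investigating-Training-Data-s-Role | 1_dataset_preprocessing_and_filtering/3_further_cleaning.py | clean_see
-- ===== SOURCE A (Python) =====
-- def clean_see(doc):
--     doc_lines = doc.split('\n')
--     cleaned_doc_lines = []
--     for line in doc_lines:
--         if '**see ' in line.lower():
--             break
--         cleaned_doc_lines.append(line)
--     return '\n'.join(cleaned_doc_lines)
-- ===== SOURCE B (Python) =====
-- def clean_see(doc):
--     idx = doc.lower().find('**see ')
--     if idx == -1:
--         return doc
--     nl = doc.rfind('\n', 0, idx)
--     return doc[:nl] if nl != -1 else ''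
-- ===== Notes on version B (the rewrite author's own statement) =====
-- stated objective: alternative
-- what changed: A splits the document into lines, loops over them with a break and rejoins; B never builds a line list: it locates the first occurrence of the marker in the lowercased document with find, locates the newline before it with rfind, and returns a single slice of the raw string.
import Mathlib
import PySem

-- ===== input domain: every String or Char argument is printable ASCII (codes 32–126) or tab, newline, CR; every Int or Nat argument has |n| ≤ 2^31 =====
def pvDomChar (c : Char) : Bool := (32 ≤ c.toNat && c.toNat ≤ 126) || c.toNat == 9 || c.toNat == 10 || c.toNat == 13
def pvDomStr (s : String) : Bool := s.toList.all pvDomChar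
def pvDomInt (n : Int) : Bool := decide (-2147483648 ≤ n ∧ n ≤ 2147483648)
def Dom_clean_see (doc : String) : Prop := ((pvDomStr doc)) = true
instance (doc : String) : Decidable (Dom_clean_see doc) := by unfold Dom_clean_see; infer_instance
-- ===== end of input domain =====

-- B replaces A's split-into-lines + loop-with-break + join by direct index arithmetic on the raw
-- string (first marker position via find, the preceding newline via rfind, one slice); same result.

-- ===== PORT A =====
-- the for-loop with break: keep lines until one whose lower() contains '**see '
def cleanLoopA : List (List Char) → List (List Char)
  | [] => []
  | line :: rest =>
    if PySem.Chars.isIn "**see ".toList (PySem.Chars.lower line) = true then []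
    else line :: cleanLoopA rest

def clean_see (doc : String) : String :=
  let doc_lines := PySem.Chars.splitOn doc.toList "\n".toList
  String.ofList (PySem.Chars.join "\n".toList (cleanLoopA doc_lines))

-- ===== PORT B =====
def clean_see_alt (doc : String) : String :=
  let idx := PySem.Str.find (PySem.Str.lower doc) "**see "
  if idx = -1 then doc
  else
    let nl := PySem.Str.rfindFrom doc "\n" 0 (some idx)
    if nl = -1 then "" else PySem.Str.slice doc none (some nl)

-- ===== PRECONDITION & SPEC =====
def Spec_clean_see (doc : String) (out : String) : Prop := out = clean_see_alt doc
instance (doc : String) (out : String) : Decidable (Spec_clean_see doc out) := by unfold Spec_clean_see; infer_instance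

-- ===== CLAIM (what is proved, stated in full; the proofs are below) =====
def Claim_equal_clean_see : Prop := ∀ (doc : String), Dom_clean_see doc → Spec_clean_see doc (clean_see doc)

-- ===== LEMMAS AND PROOFS =====

-- ---- facts about lower ----
theorem lower_append (x y : List Char) :
    PySem.Chars.lower (x ++ y) = PySem.Chars.lower x ++ PySem.Chars.lower y := by
  simp [PySem.Chars.lower]

theorem lower_cons_nl (y : List Char) :
    PySem.Chars.lower ('\n' :: y) = '\n' :: PySem.Chars.lower y := by
  simp [PySem.Chars.lower]; decide

theorem length_lower (u : List Char) : (PySem.Chars.lower u).length = u.length := by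
  simp [PySem.Chars.lower]

-- ---- prefix / infix combinatorics ----
theorem prefix_of_prefix_append {p x z : List Char} (hp : p <+: x ++ z)
    (hl : p.length ≤ x.length) : p <+: x := by
  have := List.prefix_take_iff.mpr ⟨hp, hl⟩
  rwa [List.take_left] at this

theorem drop_nl_at {x y : List Char} {j : ℕ} (h1 : j ≤ x.length) :
    ((x ++ '\n' :: y).drop j)[x.length - j]? = some '\n' := by
  rw [List.getElem?_drop]
  have : j + (x.length - j) = x.length := by omega
  rw [this]
  rw [List.getElem?_append_right (le_refl _)]
  simp

theorem straddle {sub x y : List Char} {j : ℕ} (hp : sub <+: (x ++ '\n' :: y).drop j)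
    (h1 : j ≤ x.length) (h2 : x.length < j + sub.length) : '\n' ∈ sub := by
  have hidx : x.length - j < sub.length := by omega
  have h3 := drop_nl_at (y := y) h1
  rw [List.getElem?_eq_getElem (by
    have := List.IsPrefix.length_le hp
    simp only [List.length_drop, List.length_append, List.length_cons] at this ⊢
    omega)] at h3
  have h4 : sub[x.length - j] = '\n' := by
    have := List.IsPrefix.getElem hp hidx
    rw [this]
    exact Option.some.inj h3
  rw [← h4]
  exact List.getElem_mem _

theorem no_straddle {sub x z : List Char} {j : ℕ} (hp : sub <+: (x ++ z).drop j)
    (h2 : j + sub.length ≤ x.length) : sub <+: x.drop j := by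
  rw [List.drop_append_of_le_length (by omega)] at hp
  exact prefix_of_prefix_append hp (by simp; omega)

theorem drop_past_nl {x y : List Char} {j : ℕ} (hj : x.length < j) :
    (x ++ '\n' :: y).drop j = y.drop (j - x.length - 1) := by
  have hxl : x ++ '\n' :: y = (x ++ ['\n']) ++ y := by simp
  have : j = (x ++ ['\n']).length + (j - x.length - 1) := by simp; omega
  rw [hxl, this, List.drop_append]
  rw [List.drop_eq_nil_of_le (by omega)]
  simp
  congr 1
  omega

theorem infix_append_nl {sub : List Char} (x y : List Char) (hnl : '\n' ∉ sub) :
    sub <:+: x ++ '\n' :: y ↔ sub <:+: x ∨ sub <:+: y := by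
  constructor
  · intro h
    rcases List.infix_iff_prefix_suffix.mp h with ⟨t, hpt, hts⟩
    obtain ⟨w, hw⟩ := hts
    have hdrop : t = (x ++ '\n' :: y).drop w.length := by
      rw [← hw]; simp
    rw [hdrop] at hpt
    by_cases hj : w.length ≤ x.length
    · by_cases hl : w.length + sub.length ≤ x.length
      · left
        exact (no_straddle hpt hl).isInfix.trans (x.drop_suffix _).isInfix
      · exact absurd (straddle hpt hj (by omega)) hnl
    · right
      rw [drop_past_nl (by omega)] at hpt
      exact hpt.isInfix.trans (y.drop_suffix _).isInfix
  · rintro (h | h)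
    · exact h.trans ⟨[], '\n' :: y, by simp⟩
    · exact h.trans ⟨x ++ ['\n'], [], by simp⟩

-- find picks the first occurrence; its value is determined by occurrence + minimality
theorem find_eq_of {s sub : List Char} {k : ℕ} (h1 : sub <+: s.drop k)
    (h2 : ∀ j < k, ¬ sub <+: s.drop j) : PySem.Chars.find s sub = k := by
  have hinf : sub <:+: s := h1.isInfix.trans (s.drop_suffix k).isInfix
  have hpos : 0 ≤ PySem.Chars.find s sub := (PySem.Chars.find_nonneg_iff s sub).mpr hinf
  obtain ⟨hp, hmin⟩ := PySem.Chars.find_spec hpos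
  set f := (PySem.Chars.find s sub).toNat with hf
  have hfk : PySem.Chars.find s sub = (f : ℤ) := (Int.toNat_of_nonneg hpos).symm
  rcases lt_trichotomy f k with h | h | h
  · exact absurd hp (h2 f h)
  · rw [hfk, h]
  · exact absurd h1 (hmin k h)

theorem find_append_nl {sub : List Char} (x y : List Char) (hnl : '\n' ∉ sub) (hne : sub ≠ []) :
    PySem.Chars.find (x ++ '\n' :: y) sub =
      if sub <:+: x then PySem.Chars.find x sub
      else if sub <:+: y then (x.length + 1 : ℤ) + PySem.Chars.find y sub
      else -1 := by
  have hsublen : 0 < sub.length := List.length_pos_iff.mpr hne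
  by_cases hx : sub <:+: x
  · rw [if_pos hx]
    have hpos : 0 ≤ PySem.Chars.find x sub := (PySem.Chars.find_nonneg_iff x sub).mpr hx
    obtain ⟨hp, hmin⟩ := PySem.Chars.find_spec hpos
    set i := (PySem.Chars.find x sub).toNat with hi
    have hile : (i : ℤ) ≤ x.length := by
      rw [Int.toNat_of_nonneg hpos]; exact PySem.Chars.find_le_length x sub
    have hiN : i ≤ x.length := by exact_mod_cast hile
    have hfi : PySem.Chars.find x sub = (i : ℤ) := (Int.toNat_of_nonneg hpos).symm
    rw [hfi]
    apply find_eq_of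
    · rw [List.drop_append_of_le_length hiN]
      exact hp.trans (List.prefix_append _ _)
    · intro j hj hc
      by_cases hjl : j + sub.length ≤ x.length
      · exact hmin j hj (no_straddle hc hjl)
      · exact hnl (straddle hc (by omega) (by omega))
  · by_cases hy : sub <:+: y
    · rw [if_neg hx, if_pos hy]
      have hpos : 0 ≤ PySem.Chars.find y sub := (PySem.Chars.find_nonneg_iff y sub).mpr hy
      obtain ⟨hp, hmin⟩ := PySem.Chars.find_spec hpos
      set i := (PySem.Chars.find y sub).toNat with hi
      have hfi : PySem.Chars.find y sub = (i : ℤ) := (Int.toNat_of_nonneg hpos).symm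
      rw [hfi]
      have hcast : (x.length + 1 : ℤ) + (i : ℤ) = ((x.length + 1 + i : ℕ) : ℤ) := by push_cast; ring
      rw [hcast]
      apply find_eq_of
      · have hsplit : (x ++ '\n' :: y).drop (x.length + 1 + i) = y.drop i := by
          rw [drop_past_nl (by omega)]
          congr 1
          omega
        rw [hsplit]; exact hp
      · intro j hj hc
        by_cases hjx : j ≤ x.length
        · by_cases hjl : j + sub.length ≤ x.length
          · exact hx ((no_straddle hc hjl).isInfix.trans (x.drop_suffix _).isInfix)
          · exact hnl (straddle hc hjx (by omega))
        · rw [drop_past_nl (by omega)] at hc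
          exact hmin _ (by omega) hc
    · rw [if_neg hx, if_neg hy]
      exact (PySem.Chars.find_eq_neg_one_iff _ _).mpr
        (fun h => by rcases (infix_append_nl x y hnl).mp h with h | h <;> [exact hx h; exact hy h])

-- ---- rfind ----
theorem rfind_go_neg (s sub : List Char) (k : ℕ) (h : ∀ j ≤ k, ¬ sub <+: s.drop j) :
    PySem.Chars.rfind.go s sub k = -1 := by
  induction k with
  | zero =>
    rw [PySem.Chars.rfind.go]
    rw [if_neg]
    simp only [List.isPrefixOf_iff_prefix]
    simpa using h 0 (le_refl 0)
  | succ k ih =>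
    rw [PySem.Chars.rfind.go]
    rw [if_neg]
    · exact ih (fun j hj => h j (by omega))
    · simp only [List.isPrefixOf_iff_prefix]
      exact h (k+1) (le_refl _)

theorem rfind_go_eq (s sub : List Char) (k j0 : ℕ) (hj : j0 ≤ k) (h1 : sub <+: s.drop j0)
    (h2 : ∀ j, j0 < j → j ≤ k → ¬ sub <+: s.drop j) : PySem.Chars.rfind.go s sub k = j0 := by
  induction k with
  | zero =>
    have : j0 = 0 := by omega
    subst this
    rw [PySem.Chars.rfind.go, if_pos] <;>
      first
      | rfl
      | simpa [List.isPrefixOf_iff_prefix] using h1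
  | succ k ih =>
    by_cases he : j0 = k + 1
    · subst he
      rw [PySem.Chars.rfind.go, if_pos] <;>
        first
        | rfl
        | simpa [List.isPrefixOf_iff_prefix] using h1
    · rw [PySem.Chars.rfind.go, if_neg]
      · exact ih (by omega) (fun j hja hjb => h2 j hja (by omega))
      · simp only [List.isPrefixOf_iff_prefix]
        exact h2 (k+1) (by omega) (le_refl _)

theorem nl_prefix_iff (z : List Char) : ['\n'] <+: z ↔ ∃ r, z = '\n' :: r := by
  cases z with
  | nil => simp
  | cons a r =>
    constructor
    · intro h
      rcases h with ⟨t, ht⟩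
      simp at ht
      exact ⟨r, by rw [ht.1]⟩
    · rintro ⟨r', hr⟩
      rw [hr]
      exact ⟨r', rfl⟩

theorem rfind_nl_no {u : List Char} (h : '\n' ∉ u) : PySem.Chars.rfind u ['\n'] = -1 := by
  unfold PySem.Chars.rfind
  apply rfind_go_neg
  intro j _ hp
  rcases (nl_prefix_iff _).mp hp with ⟨r, hr⟩
  exact h (by
    have : '\n' ∈ u.drop j := by rw [hr]; simp
    exact List.mem_of_mem_drop this)

theorem rfind_nl_last (x y : List Char) (hy : '\n' ∉ y) :
    PySem.Chars.rfind (x ++ '\n' :: y) ['\n'] = x.length := by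
  unfold PySem.Chars.rfind
  apply rfind_go_eq
  · simp only [List.length_append, List.length_cons]; omega
  · rw [List.drop_append_of_le_length (le_refl _)]
    simp
  · intro j hj1 hj2 hc
    rcases (nl_prefix_iff _).mp hc with ⟨r, hr⟩
    have hmem : '\n' ∈ (x ++ '\n' :: y).drop j := by rw [hr]; simp
    rw [drop_past_nl (by omega)] at hmem
    exact hy (List.mem_of_mem_drop hmem)

theorem rfindFrom_zero_some (s sub : List Char) (idx : ℤ) (h0 : 0 ≤ idx) (hle : idx ≤ s.length) :
    PySem.Chars.rfindFrom s sub 0 (some idx) = PySem.Chars.rfind (s.take idx.toNat) sub := by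
  unfold PySem.Chars.rfindFrom
  simp only
  split_ifs with h1 h2 h3 h4 <;>
    simp only [Int.toNat_zero, List.drop_zero] at * <;> omega

theorem rfind_cases (u sub : List Char) :
    PySem.Chars.rfind u sub = -1 ∨ ∃ k : ℕ, PySem.Chars.rfind u sub = k := by
  unfold PySem.Chars.rfind
  generalize u.length = k
  induction k with
  | zero =>
    rw [PySem.Chars.rfind.go]
    split
    · right; exact ⟨0, rfl⟩
    · left; rfl
  | succ k ih =>
    rw [PySem.Chars.rfind.go]
    split
    · right; exact ⟨k+1, rfl⟩
    · exact ih

-- ---- a fuel-free model of splitOn s ['\n'] ----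
def splitCh : List Char → List (List Char)
  | [] => [[]]
  | c :: t =>
    if c = '\n' then [] :: splitCh t
    else match splitCh t with
      | [] => [[c]]
      | l :: ls => (c :: l) :: ls

def consHead (p : List Char) : List (List Char) → List (List Char)
  | [] => [p]
  | x :: xs => (p ++ x) :: xs

theorem splitCh_ne_nil (s : List Char) : splitCh s ≠ [] := by
  cases s with
  | nil => simp [splitCh]
  | cons c t =>
    simp only [splitCh]
    split
    · simp
    · split <;> simp

theorem splitOn_go_spec (fuel : ℕ) (l cur : List Char) (acc : List (List Char))
    (h : l.length ≤ fuel) :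
    PySem.Chars.splitOn.go ['\n'] fuel l cur acc = acc.reverse ++ consHead cur.reverse (splitCh l) := by
  induction fuel generalizing l cur acc with
  | zero =>
    have : l = [] := List.eq_nil_of_length_eq_zero (by omega)
    subst this
    rw [PySem.Chars.splitOn.go]
    simp [splitCh, consHead]
  | succ fuel ih =>
    cases l with
    | nil =>
      rw [PySem.Chars.splitOn.go]
      · simp [splitCh, consHead]
      · omega
    | cons c rest =>
      rw [PySem.Chars.splitOn.go]
      by_cases hc : c = '\n'
      · subst hc
        rw [if_pos (by simp)]
        have hr : (List.drop (['\n'] : List Char).length ('\n' :: rest)) = rest := by simp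
        rw [hr, ih rest [] (cur.reverse :: acc) (by simp at h; omega)]
        rcases hrest : splitCh rest with _ | ⟨x, xs⟩
        · exact absurd hrest (splitCh_ne_nil rest)
        · simp [splitCh, consHead, hrest]
      · rw [if_neg (by simp; exact fun hh => hc hh.symm)]
        rw [ih rest (c :: cur) acc (by simp at h ⊢; omega)]
        rcases hrest : splitCh rest with _ | ⟨x, xs⟩
        · exact absurd hrest (splitCh_ne_nil rest)
        · simp only [splitCh, hrest, if_neg hc]
          simp [consHead]

theorem splitOn_nl (s : List Char) : PySem.Chars.splitOn s ['\n'] = splitCh s := by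
  unfold PySem.Chars.splitOn
  rw [splitOn_go_spec _ _ _ _ (by omega)]
  rcases hs : splitCh s with _ | ⟨x, xs⟩
  · exact absurd hs (splitCh_ne_nil s)
  · simp [consHead]

theorem splitCh_no_nl {s : List Char} (h : '\n' ∉ s) : splitCh s = [s] := by
  induction s with
  | nil => rfl
  | cons c t ih =>
    simp only [List.mem_cons, not_or] at h
    rw [splitCh, if_neg (fun hh => h.1 hh.symm), ih h.2]

theorem splitCh_append {l : List Char} (t : List Char) (h : '\n' ∉ l) :
    splitCh (l ++ '\n' :: t) = l :: splitCh t := by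
  induction l with
  | nil => simp [splitCh]
  | cons c l' ih =>
    simp only [List.mem_cons, not_or] at h
    rw [List.cons_append, splitCh, if_neg (fun hh => h.1 hh.symm), ih h.2]

theorem join_splitCh (s : List Char) : PySem.Chars.join ['\n'] (splitCh s) = s := by
  induction s with
  | nil => rw [show splitCh [] = [[]] from rfl, PySem.Chars.join_singleton]
  | cons c t ih =>
    simp only [splitCh]
    split
    · next hc =>
      subst hc
      rcases ht : splitCh t with _ | ⟨x, xs⟩
      · exact absurd ht (splitCh_ne_nil t)
      · rw [ht] at ih
        rw [PySem.Chars.join_cons_cons]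
        simp [ih]
    · rcases ht : splitCh t with _ | ⟨x, xs⟩
      · exact absurd ht (splitCh_ne_nil t)
      · rw [ht] at ih
        cases xs with
        | nil =>
          rw [PySem.Chars.join_singleton] at ih ⊢
          simp [ih]
        | cons y ys =>
          rw [PySem.Chars.join_cons_cons] at ih ⊢
          simp [ih]

theorem decomp_nl (s : List Char) : '\n' ∉ s ∨ ∃ l t, s = l ++ '\n' :: t ∧ '\n' ∉ l := by
  induction s with
  | nil => left; simp
  | cons c s' ih =>
    by_cases hc : c = '\n'
    · right; exact ⟨[], s', by simp [hc], by simp⟩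
    · rcases ih with h | ⟨l, t, he, hl⟩
      · left; simp [h]; exact fun hh => hc hh.symm
      · right; exact ⟨c :: l, t, by simp [he], by simp [hl]; exact fun hh => hc hh.symm⟩

theorem mem_splitCh_infix_aux :
    ∀ n : ℕ, ∀ s : List Char, s.length ≤ n → ∀ line ∈ splitCh s, line <:+: s := by
  intro n
  induction n with
  | zero =>
    intro s hs line hline
    have hnil : s = [] := by cases s <;> simp_all
    subst hnil
    simp [splitCh] at hline
    subst hline
    exact List.infix_rfl
  | succ n ih =>
    intro s hs line hline
    rcases decomp_nl s with h | ⟨l, t, he, hl⟩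
    · rw [splitCh_no_nl h] at hline
      simp at hline
      subst hline
      exact List.infix_rfl
    · subst he
      rw [splitCh_append t hl] at hline
      rcases List.mem_cons.mp hline with h1 | h1
      · subst h1; exact ⟨[], '\n' :: t, by simp⟩
      · have hlen : t.length ≤ n := by
          simp only [List.length_append, List.length_cons] at hs; omega
        exact (ih t hlen line h1).trans ⟨l ++ ['\n'], [], by simp⟩

theorem mem_splitCh_infix (s : List Char) : ∀ line ∈ splitCh s, line <:+: s :=
  mem_splitCh_infix_aux s.length s (le_refl _)

theorem lower_infix {u v : List Char} (h : u <:+: v) :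
    PySem.Chars.lower u <:+: PySem.Chars.lower v := by
  simpa [PySem.Chars.lower] using List.IsInfix.map PySem.Chars.lowerChar h

theorem take_append_nl1 (l t : List Char) (m : ℕ) :
    (l ++ '\n' :: t).take (l.length + 1 + m) = l ++ '\n' :: t.take m := by
  rw [List.take_append]
  rw [List.take_of_length_le (by omega)]
  congr 1
  have : l.length + 1 + m - l.length = m + 1 := by omega
  rw [this]
  simp

theorem nl_mem_take {u v : List Char} {m : ℕ} (h : u.length < m) :
    '\n' ∈ (u ++ '\n' :: v).take m := by
  apply List.mem_of_getElem? (i := u.length)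
  rw [List.getElem?_take, if_pos h, List.getElem?_append_right (le_refl _)]
  simp

-- ---- the two programs on char lists ----
def aChars (s : List Char) : List Char :=
  PySem.Chars.join ['\n'] (cleanLoopA (splitCh s))

def bChars (s : List Char) : List Char :=
  if PySem.Chars.find (PySem.Chars.lower s) "**see ".toList = -1 then s
  else if PySem.Chars.rfindFrom s ['\n'] 0
      (some (PySem.Chars.find (PySem.Chars.lower s) "**see ".toList)) = -1 then []
  else s.take (PySem.Chars.rfindFrom s ['\n'] 0
      (some (PySem.Chars.find (PySem.Chars.lower s) "**see ".toList))).toNat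

theorem clean_see_eq_aChars (doc : String) : clean_see doc = String.ofList (aChars (doc.toList)) := by
  unfold clean_see aChars
  rw [show ("\n".toList) = ['\n'] from rfl, splitOn_nl]

theorem clean_see_alt_eq_bChars (doc : String) :
    clean_see_alt doc = String.ofList (bChars (doc.toList)) := by
  unfold clean_see_alt bChars
  have hfind : PySem.Str.find (PySem.Str.lower doc) "**see " =
      PySem.Chars.find (PySem.Chars.lower doc.toList) ['*', '*', 's', 'e', 'e', ' '] := by
    simp [PySem.Str.find, PySem.Str.lower]
  simp only [hfind, show ("**see ".toList : List Char) = ['*', '*', 's', 'e', 'e', ' '] from rfl]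
  by_cases hidx : PySem.Chars.find (PySem.Chars.lower doc.toList) ['*', '*', 's', 'e', 'e', ' '] = -1
  · simp [hidx]
  · rw [if_neg hidx, if_neg hidx]
    have hrw : PySem.Str.rfindFrom doc "\n" 0
        (some (PySem.Chars.find (PySem.Chars.lower doc.toList) ['*', '*', 's', 'e', 'e', ' '])) =
        PySem.Chars.rfindFrom doc.toList ['\n'] 0
        (some (PySem.Chars.find (PySem.Chars.lower doc.toList) ['*', '*', 's', 'e', 'e', ' '])) := rfl
    rw [hrw]
    set idx := PySem.Chars.find (PySem.Chars.lower doc.toList) ['*', '*', 's', 'e', 'e', ' '] with hidxdef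
    have h0 : 0 ≤ idx := by
      have := PySem.Chars.neg_one_le_find (PySem.Chars.lower doc.toList) ['*', '*', 's', 'e', 'e', ' ']
      omega
    have hle : idx ≤ (doc.toList.length : ℤ) := by
      have := PySem.Chars.find_le_length (PySem.Chars.lower doc.toList) ['*', '*', 's', 'e', 'e', ' ']
      rwa [length_lower] at this
    rw [rfindFrom_zero_some _ _ _ h0 hle]
    rcases rfind_cases (doc.toList.take idx.toNat) ['\n'] with hr | ⟨k, hr⟩
    · rw [hr]; rfl
    · rw [hr]
      rw [if_neg (by omega), if_neg (by omega)]
      simp [PySem.Str.slice, PySem.List.slice_to doc.toList (by omega : (0:ℤ) ≤ ((k:ℕ):ℤ))]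

theorem cleanLoopA_all {L : List (List Char)}
    (h : ∀ line ∈ L, ¬ ("**see ".toList) <:+: PySem.Chars.lower line) : cleanLoopA L = L := by
  induction L with
  | nil => rfl
  | cons x xs ih =>
    rw [cleanLoopA, if_neg, ih (fun l hl => h l (by simp [hl]))]
    simp only [PySem.Chars.isIn_iff_infix]
    exact fun hc => h x (by simp) hc

theorem decomp_nl_last (s : List Char) : '\n' ∉ s ∨ ∃ l t, s = l ++ '\n' :: t ∧ '\n' ∉ t := by
  induction s with
  | nil => left; simp
  | cons c s' ih =>
    rcases ih with h | ⟨l, t, he, ht⟩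
    · by_cases hc : c = '\n'
      · right; exact ⟨[], s', by simp [hc], h⟩
      · left; simp [h]; exact fun hh => hc hh.symm
    · right; exact ⟨c :: l, t, by simp [he], ht⟩

theorem main_aux : ∀ n : ℕ, ∀ s : List Char, s.length ≤ n → aChars s = bChars s := by
  have hmknl : '\n' ∉ "**see ".toList := by decide
  have hmkne : "**see ".toList ≠ [] := by decide
  have hmklen : ("**see ".toList).length = 6 := by decide
  intro n
  induction n with
  | zero =>
    intro s hs
    have hnil : s = [] := by cases s <;> simp_all
    subst hnil
    decide
  | succ n ih =>
    intro s hs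
    by_cases hin : ("**see ".toList) <:+: PySem.Chars.lower s
    · -- the marker occurs somewhere
      have h0 : 0 ≤ PySem.Chars.find (PySem.Chars.lower s) "**see ".toList :=
        (PySem.Chars.find_nonneg_iff _ _).mpr hin
      rcases decomp_nl s with hno | ⟨l, t, he, hl⟩
      · -- single line: A drops it, B finds no preceding newline
        have hle : PySem.Chars.find (PySem.Chars.lower s) "**see ".toList ≤ (s.length : ℤ) := by
          have := PySem.Chars.find_le_length (PySem.Chars.lower s) "**see ".toList
          rwa [length_lower] at this
        have hA : aChars s = [] := by
          unfold aChars
          rw [splitCh_no_nl hno, cleanLoopA, if_pos ((PySem.Chars.isIn_iff_infix _ _).mpr hin),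
            PySem.Chars.join_nil]
        have hB : bChars s = [] := by
          unfold bChars
          rw [rfindFrom_zero_some _ _ _ h0 hle,
            rfind_nl_no (fun hmem => hno (List.mem_of_mem_take hmem)), if_neg (by omega),
            if_pos rfl]
        rw [hA, hB]
      · subst he
        have hls : PySem.Chars.lower (l ++ '\n' :: t) =
            PySem.Chars.lower l ++ '\n' :: PySem.Chars.lower t := by
          rw [lower_append, lower_cons_nl]
        have hfa := find_append_nl (sub := "**see ".toList) (PySem.Chars.lower l)
          (PySem.Chars.lower t) hmknl hmkne
        by_cases hml : ("**see ".toList) <:+: PySem.Chars.lower l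
        · -- marker already in the first line: both return the empty string
          have hfl : 0 ≤ PySem.Chars.find (PySem.Chars.lower l) "**see ".toList :=
            (PySem.Chars.find_nonneg_iff _ _).mpr hml
          obtain ⟨hp, _⟩ := PySem.Chars.find_spec hfl
          set i := (PySem.Chars.find (PySem.Chars.lower l) "**see ".toList).toNat with hidef
          have hfi : PySem.Chars.find (PySem.Chars.lower l) "**see ".toList = (i : ℤ) :=
            (Int.toNat_of_nonneg hfl).symm
          have hilen : i + 6 ≤ l.length := by
            have h1 := List.IsPrefix.length_le hp
            simp only [List.length_drop, length_lower, hmklen] at h1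
            omega
          have hfinds : PySem.Chars.find (PySem.Chars.lower (l ++ '\n' :: t)) "**see ".toList
              = (i : ℤ) := by
            rw [hls, hfa, if_pos hml, hfi]
          have htake : (l ++ '\n' :: t).take i = l.take i := by
            rw [List.take_append]
            have hz : i - l.length = 0 := by omega
            rw [hz]
            simp
          have hA : aChars (l ++ '\n' :: t) = [] := by
            unfold aChars
            rw [splitCh_append t hl, cleanLoopA,
              if_pos ((PySem.Chars.isIn_iff_infix _ _).mpr hml), PySem.Chars.join_nil]
          have hB : bChars (l ++ '\n' :: t) = [] := by
            unfold bChars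
            rw [hfinds, rfindFrom_zero_some _ _ _ (by omega) (by simp; omega)]
            rw [Int.toNat_natCast, htake,
              rfind_nl_no (fun hmem => hl (List.mem_of_mem_take hmem)), if_neg (by omega),
              if_pos rfl]
          rw [hA, hB]
        · -- marker first occurs in t
          have hmt : ("**see ".toList) <:+: PySem.Chars.lower t := by
            rw [hls] at hin
            rcases (infix_append_nl _ _ hmknl).mp hin with h | h
            · exact absurd h hml
            · exact h
          have hft0 : 0 ≤ PySem.Chars.find (PySem.Chars.lower t) "**see ".toList :=
            (PySem.Chars.find_nonneg_iff _ _).mpr hmt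
          set it := (PySem.Chars.find (PySem.Chars.lower t) "**see ".toList).toNat with hitdef
          have hfit : PySem.Chars.find (PySem.Chars.lower t) "**see ".toList = (it : ℤ) :=
            (Int.toNat_of_nonneg hft0).symm
          have hitle : it ≤ t.length := by
            have := PySem.Chars.find_le_length (PySem.Chars.lower t) "**see ".toList
            rw [length_lower] at this
            omega
          have hfinds : PySem.Chars.find (PySem.Chars.lower (l ++ '\n' :: t)) "**see ".toList
              = ((l.length + 1 + it : ℕ) : ℤ) := by
            rw [hls, hfa, if_neg hml, if_pos hmt, hfit, length_lower]
            push_cast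
            ring
          have hlen_s : ((l.length + 1 + it : ℕ) : ℤ) ≤ ((l ++ '\n' :: t).length : ℤ) := by
            simp only [List.length_append, List.length_cons]
            push_cast
            omega
          have htk : (l ++ '\n' :: t).take (l.length + 1 + it) = l ++ '\n' :: t.take it :=
            take_append_nl1 l t it
          have hlt : t.length ≤ n := by
            simp only [List.length_append, List.length_cons] at hs
            omega
          rcases decomp_nl_last (t.take it) with hno2 | ⟨y1, y2, hy, hy2⟩
          · -- no newline before the match: result is exactly the first line l
            have hB : bChars (l ++ '\n' :: t) = l := by
              unfold bChars
              rw [hfinds, rfindFrom_zero_some _ _ _ (by omega) hlen_s, Int.toNat_natCast, htk,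
                rfind_nl_last _ _ hno2, if_neg (by omega), if_neg (by omega), Int.toNat_natCast,
                List.take_left]
            have hA : aChars (l ++ '\n' :: t) = l := by
              unfold aChars
              rw [splitCh_append t hl, cleanLoopA,
                if_neg (fun hcc => hml ((PySem.Chars.isIn_iff_infix _ _).mp hcc))]
              have hct : cleanLoopA (splitCh t) = [] := by
                rcases decomp_nl t with hno3 | ⟨u, v, hu, hunl⟩
                · rw [splitCh_no_nl hno3, cleanLoopA,
                    if_pos ((PySem.Chars.isIn_iff_infix _ _).mpr hmt)]
                · subst hu
                  have hmu : ("**see ".toList) <:+: PySem.Chars.lower u := by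
                    by_contra hmu
                    have hmv : ("**see ".toList) <:+: PySem.Chars.lower v := by
                      rw [show PySem.Chars.lower (u ++ '\n' :: v) =
                          PySem.Chars.lower u ++ '\n' :: PySem.Chars.lower v
                        from by rw [lower_append, lower_cons_nl]] at hmt
                      rcases (infix_append_nl _ _ hmknl).mp hmt with h | h
                      · exact absurd h hmu
                      · exact h
                    have hfv0 : 0 ≤ PySem.Chars.find (PySem.Chars.lower v) "**see ".toList :=
                      (PySem.Chars.find_nonneg_iff _ _).mpr hmv
                    have hft : PySem.Chars.find (PySem.Chars.lower (u ++ '\n' :: v))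
                        "**see ".toList = (u.length + 1 : ℤ) +
                          PySem.Chars.find (PySem.Chars.lower v) "**see ".toList := by
                      rw [show PySem.Chars.lower (u ++ '\n' :: v) =
                          PySem.Chars.lower u ++ '\n' :: PySem.Chars.lower v
                        from by rw [lower_append, lower_cons_nl]]
                      rw [find_append_nl _ _ hmknl hmkne, if_neg hmu, if_pos hmv, length_lower]
                    have hult : u.length < it := by
                      rw [hft] at hfit
                      omega
                    exact hno2 (nl_mem_take hult)
                  rw [splitCh_append v hunl, cleanLoopA,
                    if_pos ((PySem.Chars.isIn_iff_infix _ _).mpr hmu)]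
              rw [hct, PySem.Chars.join_singleton]
            rw [hA, hB]
          · -- a newline precedes the match: both sides peel off the first line and recurse
            have hy1pt : t.take (y1.length) = y1 := by
              have hpre : y1 <+: t := (hy ▸ (List.prefix_append y1 ('\n' :: y2)) :
                  y1 <+: t.take it).trans (List.take_prefix it t)
              exact (List.prefix_iff_eq_take.mp hpre).symm
            have hsplit2 : l ++ '\n' :: t.take it = (l ++ '\n' :: y1) ++ '\n' :: y2 := by
              rw [hy]
              simp
            have hB : bChars (l ++ '\n' :: t) = l ++ '\n' :: y1 := by
              unfold bChars
              rw [hfinds, rfindFrom_zero_some _ _ _ (by omega) hlen_s, Int.toNat_natCast, htk,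
                hsplit2, rfind_nl_last _ _ hy2, if_neg (by omega), if_neg (by omega)]
              simp only [List.length_append, List.length_cons]
              rw [show ((l.length + (y1.length + 1) : ℕ) : ℤ).toNat = l.length + 1 + y1.length
                by omega]
              rw [take_append_nl1, hy1pt]
            have hBt : bChars t = y1 := by
              unfold bChars
              rw [hfit, rfindFrom_zero_some _ _ _ (by omega) (by exact_mod_cast hitle),
                Int.toNat_natCast, hy, rfind_nl_last _ _ hy2, if_neg (by omega),
                if_neg (by omega), Int.toNat_natCast, hy1pt]
            have hnlt : '\n' ∈ t := by
              apply List.mem_of_mem_take (l := t) (i := it)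
              rw [hy]
              simp
            rcases decomp_nl t with hno3 | ⟨u, v, hu, hunl⟩
            · exact absurd hnlt hno3
            · subst hu
              have hmu : ¬ ("**see ".toList) <:+: PySem.Chars.lower u := by
                intro hmu
                have hfu : 0 ≤ PySem.Chars.find (PySem.Chars.lower u) "**see ".toList :=
                  (PySem.Chars.find_nonneg_iff _ _).mpr hmu
                obtain ⟨hpu, _⟩ := PySem.Chars.find_spec hfu
                set j := (PySem.Chars.find (PySem.Chars.lower u) "**see ".toList).toNat with hjdef
                have hjlen : j + 6 ≤ u.length := by
                  have h1 := List.IsPrefix.length_le hpu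
                  simp only [List.length_drop, length_lower, hmklen] at h1
                  omega
                have hft : PySem.Chars.find (PySem.Chars.lower (u ++ '\n' :: v)) "**see ".toList
                    = (j : ℤ) := by
                  rw [show PySem.Chars.lower (u ++ '\n' :: v) =
                      PySem.Chars.lower u ++ '\n' :: PySem.Chars.lower v
                    from by rw [lower_append, lower_cons_nl]]
                  rw [find_append_nl _ _ hmknl hmkne, if_pos hmu,
                    (Int.toNat_of_nonneg hfu).symm]
                have hitj : it = j := by
                  rw [hft] at hfit
                  omega
                have htkj : (u ++ '\n' :: v).take it = u.take j := by
                  rw [hitj, List.take_append]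
                  have hz : j - u.length = 0 := by omega
                  rw [hz]
                  simp
                have : '\n' ∈ (u ++ '\n' :: v).take it := by
                  rw [hy]
                  simp
                rw [htkj] at this
                exact hunl (List.mem_of_mem_take this)
              have hA : aChars (l ++ '\n' :: (u ++ '\n' :: v)) =
                  l ++ '\n' :: aChars (u ++ '\n' :: v) := by
                unfold aChars
                rw [splitCh_append _ hl, splitCh_append _ hunl]
                rw [cleanLoopA, if_neg (fun hcc => hml ((PySem.Chars.isIn_iff_infix _ _).mp hcc))]
                rw [cleanLoopA, if_neg (fun hcc => hmu ((PySem.Chars.isIn_iff_infix _ _).mp hcc))]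
                rw [PySem.Chars.join_cons_cons]
                simp
              rw [hA, ih _ hlt, hBt, hB]
    · -- the marker does not occur: both return the input unchanged
      have hfind : PySem.Chars.find (PySem.Chars.lower s) "**see ".toList = -1 :=
        (PySem.Chars.find_eq_neg_one_iff _ _).mpr hin
      have hB : bChars s = s := by
        unfold bChars
        rw [hfind, if_pos rfl]
      rw [hB]
      unfold aChars
      rw [cleanLoopA_all, join_splitCh]
      intro line hline hcon
      exact hin (hcon.trans (lower_infix (mem_splitCh_infix s line hline)))

theorem main_eq : ∀ s : List Char, aChars s = bChars s := fun s =>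
  main_aux s.length s (le_refl _)

-- ===== VERDICT (by name: the statement is the Claim_ definition above) =====
theorem clean_see_spec : Claim_equal_clean_see := by
  intro doc _
  unfold Spec_clean_see
  rw [clean_see_eq_aChars, clean_see_alt_eq_bChars, main_eq]
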